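-- pv_equiv track=rewrite | github.com/jiajunzhu0107/LeetCode | String/LongestSubstringWithoutTwoContiguousOccurrencesofLetter.py | longestValidString
-- ===== SOURCE A (Python) =====
-- def longestValidString(str) -> str:
--       # WRITE YOUR BRILLIANT CODE HERE
--     prev_c = ''
--     cnt = 0
--     left = 0
--     right = 0
--     max_length = 0
--     current_length = 0
--     res = ''
--     while right < len(str):
--         if str[right] == prev_c:
--             cnt += 1
--             if cnt > 2:
--                 left = right - 1
--         else:
--             cnt = 1
--         current_length = right - left + 1
--         if current_length > max_length:
--             res = str[left:right+1]
--         max_length = max(max_length, current_length)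
--         prev_c = str[right]
--         right += 1
--
--     return res
-- ===== SOURCE B (Python) =====
-- def longestValidString(str) -> str:
--     n = len(str)
--     if n == 0:
--         return ''
--     cuts = [i for i in range(2, n) if str[i] == str[i-1] == str[i-2]]
--     starts = [0] + [c - 1 for c in cuts]
--     ends = [c - 1 for c in cuts] + [n - 1]
--     best_start, best_end, best_len = 0, -1, 0
--     for s, e in zip(starts, ends):
--         if e - s + 1 > best_len:
--             best_start, best_end, best_len = s, e, e - s + 1
--     return str[best_start:best_end + 1]
-- ===== Notes on version B (the rewrite author's own statement) =====
-- stated objective: alternative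
-- what changed: Replaces the stateful sliding-window scan (prev char, run counter, moving left pointer, running max) by a segment decomposition: one pass collects the triple-completion indices, these induce the maximal valid segments as (start,end) pairs, and a second pass picks the first longest segment.
import Mathlib
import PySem

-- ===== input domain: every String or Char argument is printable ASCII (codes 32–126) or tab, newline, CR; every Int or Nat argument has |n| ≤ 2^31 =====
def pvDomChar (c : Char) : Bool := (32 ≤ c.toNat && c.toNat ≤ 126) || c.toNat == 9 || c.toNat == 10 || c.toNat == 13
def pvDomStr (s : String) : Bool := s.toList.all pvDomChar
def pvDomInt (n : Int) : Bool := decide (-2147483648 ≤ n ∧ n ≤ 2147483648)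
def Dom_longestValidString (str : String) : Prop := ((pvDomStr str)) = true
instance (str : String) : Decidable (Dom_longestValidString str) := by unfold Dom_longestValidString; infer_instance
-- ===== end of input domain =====

-- B replaces A's stateful sliding-window scan by a segment decomposition (cut indices →
-- maximal valid segments → first longest segment); same O(n) cost, alternative algorithm.

-- ===== PORT A =====
-- The while loop becomes a recursion carrying all loop variables; the final state is
-- returned and the function projects `res`.  prev_c = '' is modelled as `none` (Python's
-- '' never equals the 1-char string str[right]).  Indices stay Nat: right only grows from
-- 0 and left is set to right-1 only when cnt > 2, i.e. right ≥ 2, so no Python index is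
-- ever negative and Nat subtraction is exact here.
def loopA (l : List Char) (prev : Option Char) (cnt left right maxLen : Nat) (res : List Char) :
    Option Char × Nat × Nat × Nat × Nat × List Char :=
  if h : right < l.length then
    let c := l[right]
    let cnt' := if some c = prev then cnt + 1 else 1
    let left' := if some c = prev ∧ cnt + 1 > 2 then right - 1 else left
    let cur := right - left' + 1
    let res' := if cur > maxLen then PySem.List.slice l (some (left' : Int)) (some ((right + 1 : Nat) : Int)) else res
    loopA l (some c) cnt' left' (right + 1) (max maxLen cur) res'
  else (prev, cnt, left, right, maxLen, res)
termination_by l.length - right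

def longestValidString (str : String) : String :=
  String.ofList (loopA str.toList none 0 0 0 0 []).2.2.2.2.2

-- ===== PORT B =====
-- the comprehension's condition str[i] == str[i-1] == str[i-2]
def pvPred (l : List Char) (i : Nat) : Bool :=
  l.getD i ' ' == l.getD (i - 1) ' ' && l.getD (i - 1) ' ' == l.getD (i - 2) ' '

-- [i for i in range(2, n) if str[i] == str[i-1] == str[i-2]]
def pvCuts (l : List Char) : List Nat :=
  (List.range' 2 (l.length - 2)).filter (pvPred l)

def longestValidString_alt (str : String) : String :=
  let l := str.toList
  let n := l.length
  if n = 0 then "" else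
    let a : List Nat := (pvCuts l).map (· - 1)
    let pairs := (0 :: a).zip (a ++ [n - 1])
    let best := pairs.tail.foldl
      (fun b p => if p.2 - p.1 + 1 > b.2 - b.1 + 1 then p else b) (pairs.headD (0, n - 1))
    String.ofList (PySem.List.slice l (some (best.1 : Int)) (some ((best.2 + 1 : Nat) : Int)))

-- ===== PRECONDITION & SPEC =====
def Spec_longestValidString (str : String) (out : String) : Prop := out = longestValidString_alt str
instance (str : String) (out : String) : Decidable (Spec_longestValidString str out) := by unfold Spec_longestValidString; infer_instance

-- ===== CLAIM (what is proved, stated in full; the proofs are below) =====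
def Claim_equal_longestValidString : Prop := ∀ (str : String), Dom_longestValidString str → Spec_longestValidString str (longestValidString str)

-- ===== LEMMAS AND PROOFS =====

-- the run length of equal characters at the end of l (A's cnt after processing l)
def runAux : List Char → Nat
  | [] => 0
  | [_] => 1
  | x :: y :: t => if x = y then runAux (y :: t) + 1 else 1

def runLen (l : List Char) : Nat := runAux l.reverse

-- start index of the current (last) maximal segment
def lastStart (l : List Char) : Nat := ((pvCuts l).map (· - 1)).getLastD 0

-- the segment pairs B zips together
def segPairs (l : List Char) : List (Nat × Nat) :=
  let a : List Nat := (pvCuts l).map (· - 1)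
  (0 :: a).zip (a ++ [l.length - 1])

def closedP (l : List Char) : List (Nat × Nat) :=
  let a : List Nat := (pvCuts l).map (· - 1)
  (0 :: a).zip a

-- first-longest selection as an option-valued fold
def bestO (b : Option (Nat × Nat)) (p : Nat × Nat) : Option (Nat × Nat) :=
  match b with
  | none => some p
  | some q => if p.2 - p.1 + 1 > q.2 - q.1 + 1 then some p else some q

def bestF (ps : List (Nat × Nat)) : Option (Nat × Nat) := ps.foldl bestO none

def bLen : Option (Nat × Nat) → Nat
  | none => 0
  | some q => q.2 - q.1 + 1

def bRes (l : List Char) : Option (Nat × Nat) → List Char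
  | none => []
  | some q => (l.drop q.1).take (q.2 + 1 - q.1)

-- A's one loop iteration at index l.length on input l ++ [x]
def stepL (l : List Char) (x : Char) (s : Option Char × Nat × Nat × Nat × Nat × List Char) :
    Option Char × Nat × Nat × Nat × Nat × List Char :=
  let cnt' := if some x = s.1 then s.2.1 + 1 else 1
  let left' := if some x = s.1 ∧ s.2.1 + 1 > 2 then s.2.2.2.1 - 1 else s.2.2.1
  let cur := s.2.2.2.1 - left' + 1
  (some x, cnt', left', s.2.2.2.1 + 1, max s.2.2.2.2.1 cur,
    if cur > s.2.2.2.2.1 then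
      PySem.List.slice (l ++ [x]) (some (left' : Int)) (some ((s.2.2.2.1 + 1 : Nat) : Int))
    else s.2.2.2.2.2)

theorem slice_append_of_le {l : List Char} {x : Char} {a b : Nat} (hb : b ≤ l.length) :
    PySem.List.slice (l ++ [x]) (some (a : Int)) (some (b : Int)) =
      PySem.List.slice l (some (a : Int)) (some (b : Int)) := by
  rw [PySem.List.slice_natCast, PySem.List.slice_natCast]
  by_cases ha : a ≤ l.length
  · rw [List.drop_append_of_le_length ha, List.take_append_of_le_length]
    simp only [List.length_drop]; omega
  · have h0 : b - a = 0 := by omega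
    simp [h0]

theorem loopA_append_last (l : List Char) (x : Char) (prev : Option Char)
    (cnt left maxLen : Nat) (res : List Char) :
    loopA (l ++ [x]) prev cnt left l.length maxLen res =
      stepL l x (prev, cnt, left, l.length, maxLen, res) := by
  rw [loopA, dif_pos (by simp : l.length < (l ++ [x]).length)]
  rw [loopA, dif_neg (by simp : ¬ (l.length + 1 < (l ++ [x]).length))]
  simp only [stepL, List.getElem_concat_length]

theorem loopA_append (l : List Char) (x : Char) :
    ∀ right prev cnt left maxLen res, right ≤ l.length →
      loopA (l ++ [x]) prev cnt left right maxLen res =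
        stepL l x (loopA l prev cnt left right maxLen res) := by
  have H : ∀ fuel right prev cnt left maxLen res, l.length - right ≤ fuel → right ≤ l.length →
      loopA (l ++ [x]) prev cnt left right maxLen res =
        stepL l x (loopA l prev cnt left right maxLen res) := by
    intro fuel
    induction fuel with
    | zero =>
      intro right prev cnt left maxLen res hf hr
      have hr' : right = l.length := by omega
      subst hr'
      rw [loopA_append_last]
      rw [loopA, dif_neg (by omega : ¬ (l.length < l.length))]
    | succ n ih =>
      intro right prev cnt left maxLen res hf hr
      rcases lt_or_eq_of_le hr with hlt | heq
      · have hx : right < (l ++ [x]).length := by simp; omega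
        conv_lhs => rw [loopA]
        conv_rhs => rw [loopA]
        rw [dif_pos hx, dif_pos hlt]
        have hc : (l ++ [x])[right]'hx = l[right]'hlt := List.getElem_append_left hlt
        simp only [hc]
        rw [slice_append_of_le (by omega)]
        exact ih (right + 1) _ _ _ _ _ (by omega) (by omega)
      · subst heq
        rw [loopA_append_last]
        rw [loopA, dif_neg (lt_irrefl l.length)]
  intro right prev cnt left maxLen res hr
  exact H (l.length - right) right prev cnt left maxLen res le_rfl hr

theorem foldl_bestO_some (ps : List (Nat × Nat)) (q : Nat × Nat) :
    ps.foldl bestO (some q) =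
      some (ps.foldl (fun b p => if p.2 - p.1 + 1 > b.2 - b.1 + 1 then p else b) q) := by
  induction ps generalizing q with
  | nil => rfl
  | cons p t ih =>
    simp only [List.foldl_cons]
    rw [show bestO (some q) p = some (if p.2 - p.1 + 1 > q.2 - q.1 + 1 then p else q) by
      simp only [bestO]; split_ifs <;> rfl]
    exact ih _

theorem mem_bestF {ps : List (Nat × Nat)} {q : Nat × Nat} (h : bestF ps = some q) : q ∈ ps := by
  have H : ∀ (ps : List (Nat × Nat)) (b : Option (Nat × Nat)) (q : Nat × Nat),
      ps.foldl bestO b = some q → q ∈ ps ∨ b = some q := by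
    intro ps
    induction ps with
    | nil => intro b q hb; exact Or.inr hb
    | cons p t ih =>
      intro b q hb
      rcases ih (bestO b p) q hb with hm | he
      · exact Or.inl (List.mem_cons_of_mem _ hm)
      · rcases b with _ | b0
        · simp only [bestO] at he
          exact Or.inl (by simp [Option.some_inj.mp he])
        · simp only [bestO] at he
          split_ifs at he
          · exact Or.inl (by simp [Option.some_inj.mp he])
          · exact Or.inr he
  rcases H ps none q h with hm | he
  · exact hm
  · simp at he

theorem zip_last (a : List Nat) (h : Nat) (e : Nat) :
    (h :: a).zip (a ++ [e]) = (h :: a).zip a ++ [(a.getLastD h, e)] := by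
  induction a generalizing h with
  | nil => simp
  | cons b t ih =>
    simp only [List.cons_append, List.zip_cons_cons, List.getLastD_cons]
    rw [ih b]

theorem zip_cons_append (a : List Nat) (h : Nat) (e : Nat) :
    (h :: (a ++ [e])).zip (a ++ [e]) = (h :: a).zip (a ++ [e]) := by
  induction a generalizing h with
  | nil => simp
  | cons b t ih => simpa [List.zip_cons_cons] using ih b

theorem segPairs_eq (l : List Char) :
    segPairs l = closedP l ++ [(lastStart l, l.length - 1)] := by
  simp only [segPairs, closedP, lastStart]
  exact zip_last _ 0 _

theorem mem_pvCuts {l : List Char} {c : Nat} (h : c ∈ pvCuts l) : 2 ≤ c ∧ c < l.length := by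
  unfold pvCuts at h
  have := List.mem_range'_1.mp (List.mem_of_mem_filter h)
  omega

theorem lastStart_le {l : List Char} (h : l ≠ []) : lastStart l ≤ l.length - 1 := by
  unfold lastStart
  rcases List.eq_nil_or_concat ((pvCuts l).map (· - 1)) with h0 | ⟨t, b, hb⟩
  · simp [h0]
  · rw [List.concat_eq_append] at hb
    rw [hb, List.getLastD_concat]
    have hbm : b ∈ (pvCuts l).map (· - 1) := by rw [hb]; simp
    obtain ⟨c, hc, rfl⟩ := List.mem_map.mp hbm
    have := mem_pvCuts hc
    omega

theorem segPairs_bounds {l : List Char} (h : l ≠ []) {p : Nat × Nat} (hp : p ∈ segPairs l) :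
    p.1 ≤ l.length - 1 ∧ p.2 ≤ l.length - 1 := by
  obtain ⟨p1, p2⟩ := p
  unfold segPairs at hp
  have := List.of_mem_zip hp
  obtain ⟨h1, h2⟩ := this
  constructor
  · rcases List.mem_cons.mp h1 with rfl | hm
    · omega
    · obtain ⟨c, hc, rfl⟩ := List.mem_map.mp hm
      have := mem_pvCuts hc; omega
  · rcases List.mem_append.mp h2 with hm | hm
    · obtain ⟨c, hc, rfl⟩ := List.mem_map.mp hm
      have := mem_pvCuts hc; omega
    · simp at hm; omega

theorem runAux_pos {l : List Char} (h : l ≠ []) : 1 ≤ runAux l := by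
  match l with
  | [x] => simp [runAux]
  | x :: y :: t => unfold runAux; split_ifs <;> omega

theorem runAux_le_length (l : List Char) : runAux l ≤ l.length := by
  match l with
  | [] => simp [runAux]
  | [x] => simp [runAux]
  | x :: y :: t =>
    have := runAux_le_length (y :: t)
    unfold runAux
    split_ifs
    · simp only [List.length_cons] at this ⊢; omega
    · simp only [List.length_cons]; omega

theorem runLen_le_length (l : List Char) : runLen l ≤ l.length := by
  have := runAux_le_length l.reverse
  simpa [runLen] using this

theorem runLen_append {l : List Char} (h : l ≠ []) (x : Char) :
    runLen (l ++ [x]) = if some x = l.getLast? then runLen l + 1 else 1 := by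
  obtain ⟨y, t, hrev⟩ : ∃ y t, l.reverse = y :: t := by
    cases hl : l.reverse with
    | nil => exact absurd (by simpa using hl) h
    | cons y t => exact ⟨y, t, rfl⟩
  have hy : l.getLast? = some y := by rw [← List.head?_reverse, hrev]; rfl
  have h1 : (l ++ [x]).reverse = x :: y :: t := by simp [hrev]
  rw [runLen, h1, hy]
  rcases t with _ | ⟨z, t'⟩
  · unfold runAux
    simp [runLen, hrev, runAux, eq_comm]
  · show (if x = y then runAux (y :: z :: t') + 1 else 1) = _
    simp [runLen, hrev, eq_comm]

theorem pvPred_append {l : List Char} (h2 : 2 ≤ l.length) (x : Char) :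
    pvPred (l ++ [x]) l.length = true ↔ (some x = l.getLast? ∧ 2 ≤ runLen l) := by
  obtain ⟨y, z, t, hrev⟩ : ∃ y z t, l.reverse = y :: z :: t := by
    rcases hl : l.reverse with _ | ⟨y, _ | ⟨z, t⟩⟩
    · exfalso
      have h0 : l.length = 0 := by simpa using congrArg List.length hl
      omega
    · exfalso
      have h0 : l.length = 1 := by simpa using congrArg List.length hl
      omega
    · exact ⟨y, z, t, rfl⟩
  have hL : l = t.reverse ++ [z, y] := by
    have := congrArg List.reverse hrev
    simpa using this
  have hn : l.length = t.length + 2 := by rw [hL]; simp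
  have hy : l.getLast? = some y := by rw [← List.head?_reverse, hrev]; rfl
  have hxl : l ++ [x] = t.reverse ++ [z, y, x] := by rw [hL]; simp
  have g0 : (l ++ [x]).getD l.length ' ' = x := by
    rw [hxl, List.getD_append_right _ _ _ _ (by simp [hn])]
    have hi : l.length - t.reverse.length = 2 := by simp [hn]
    rw [hi]; rfl
  have g1 : (l ++ [x]).getD (l.length - 1) ' ' = y := by
    rw [hxl, List.getD_append_right _ _ _ _ (by simp [hn])]
    have hi : l.length - 1 - t.reverse.length = 1 := by simp [hn]
    rw [hi]; rfl
  have g2 : (l ++ [x]).getD (l.length - 2) ' ' = z := by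
    rw [hxl, List.getD_append_right _ _ _ _ (by simp [hn])]
    have hi : l.length - 2 - t.reverse.length = 0 := by simp [hn]
    rw [hi]; rfl
  have hrl : (2 ≤ runLen l) = (y = z) := by
    apply propext
    rw [runLen, hrev]
    unfold runAux
    split_ifs with hyz
    · have := runAux_pos (l := z :: t) (by simp)
      simp [hyz]; omega
    · simp [hyz]
  unfold pvPred
  rw [g0, g1, g2, hy, hrl]
  simp [Bool.and_eq_true, beq_iff_eq]

theorem pvCuts_append (l : List Char) (x : Char) (h : l ≠ []) :
    pvCuts (l ++ [x]) =
      pvCuts l ++ (if (some x = l.getLast? ∧ 2 ≤ runLen l) then [l.length] else []) := by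
  by_cases h2 : 2 ≤ l.length
  · have hlen : (l ++ [x]).length - 2 = (l.length - 2) + 1 := by simp; omega
    unfold pvCuts
    rw [hlen, List.range'_concat, List.filter_append]
    have hcong : (List.range' 2 (l.length - 2)).filter (pvPred (l ++ [x])) =
        (List.range' 2 (l.length - 2)).filter (pvPred l) := by
      apply List.filter_congr
      intro i hi
      have hi' := List.mem_range'_1.mp hi
      have hib : i < l.length := by omega
      unfold pvPred
      rw [List.getD_append _ _ _ _ hib, List.getD_append _ _ _ _ (by omega),
        List.getD_append _ _ _ _ (by omega)]
    rw [hcong]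
    congr 1
    have hsum : 2 + 1 * (l.length - 2) = l.length := by omega
    rw [hsum]
    by_cases hc : (some x = l.getLast? ∧ 2 ≤ runLen l)
    · rw [if_pos hc]
      have := (pvPred_append h2 x).mpr hc
      simp [List.filter, this]
    · rw [if_neg hc]
      have : pvPred (l ++ [x]) l.length = false := by
        rcases hb : pvPred (l ++ [x]) l.length
        · rfl
        · exact absurd ((pvPred_append h2 x).mp hb) hc
      simp [List.filter, this]
  · rcases l with _ | ⟨c, _ | ⟨d, t⟩⟩
    · exact absurd rfl h
    · have hr1 : runLen [c] = 1 := rfl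
      simp [pvCuts, hr1]
    · exfalso
      exact h2 (by simp [List.length_cons])

theorem bRes_append {l : List Char} {x : Char} {q : Nat × Nat}
    (h1 : q.1 ≤ l.length - 1) (h2 : q.2 ≤ l.length - 1) (hl : l ≠ []) :
    bRes (l ++ [x]) (some q) = bRes l (some q) := by
  have hlen : 1 ≤ l.length := by
    have h0 : l.length ≠ 0 := fun hz => hl (List.eq_nil_of_length_eq_zero hz)
    omega
  simp only [bRes]
  rw [List.drop_append_of_le_length (by omega), List.take_append_of_le_length]
  simp only [List.length_drop]; omega

theorem bRes_slice (l : List Char) (a b : Nat) (hb : 1 ≤ b) :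
    PySem.List.slice l (some (a : Int)) (some (b : Int)) = bRes l (some (a, b - 1)) := by
  rw [PySem.List.slice_natCast]
  simp only [bRes]
  congr 1
  omega

theorem bLen_some (q : Nat × Nat) : bLen (some q) = q.2 - q.1 + 1 := rfl

theorem bLen_mk (a b : Nat) : bLen (some (a, b)) = b - a + 1 := rfl

theorem bestO_some_mk (q : Nat × Nat) (a b : Nat) :
    bestO (some q) (a, b) = if b - a + 1 > q.2 - q.1 + 1 then some (a, b) else some q := rfl

theorem bestO_none_mk (p : Nat × Nat) : bestO none p = some p := rfl

theorem bestO_some (b : Option (Nat × Nat)) (p : Nat × Nat) : ∃ q, bestO b p = some q := by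
  rcases b with _ | q
  · exact ⟨p, rfl⟩
  · by_cases hc : p.2 - p.1 + 1 > q.2 - q.1 + 1
    · exact ⟨p, by simp [bestO, hc]⟩
    · exact ⟨q, by simp [bestO, hc]⟩

theorem bestF_append (ps : List (Nat × Nat)) (p : Nat × Nat) :
    bestF (ps ++ [p]) = bestO (bestF ps) p := by
  simp [bestF, List.foldl_append]

theorem bestF_segPairs_some {l : List Char} (h : l ≠ []) :
    ∃ q, bestF (segPairs l) = some q := by
  rw [segPairs_eq l, bestF_append]
  exact bestO_some _ _

theorem cond_iff (x : Char) (l : List Char) :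
    (some x = l.getLast? ∧ runLen l + 1 > 2) ↔ (some x = l.getLast? ∧ 2 ≤ runLen l) := by
  constructor <;> rintro ⟨hx, hr⟩ <;> exact ⟨hx, by omega⟩

theorem invA (l : List Char) (h : l ≠ []) :
    loopA l none 0 0 0 0 [] =
      (l.getLast?, runLen l, lastStart l, l.length,
        bLen (bestF (segPairs l)), bRes l (bestF (segPairs l))) := by
  induction l using List.reverseRecOn with
  | nil => exact absurd rfl h
  | append_singleton l x ih =>
    rcases eq_or_ne l [] with rfl | hl
    · simp only [List.nil_append]
      rw [loopA, dif_pos (by simp : (0 : Nat) < [x].length)]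
      rw [loopA, dif_neg (by simp : ¬ (0 + 1 < [x].length))]
      have hs : PySem.List.slice [x] (some ((0 : Nat) : Int)) (some ((0 + 1 : Nat) : Int)) = [x] := by
        rw [PySem.List.slice_natCast]; rfl
      have hs2 : PySem.List.slice [x] none (some 1) = [x] := by
        rw [show (1 : Int) = ((1 : Nat) : Int) from rfl, PySem.List.slice_to_natCast]; rfl
      simp [hs, hs2, runLen, runAux, lastStart, pvCuts, segPairs, closedP, bestF, bestO, bLen, bRes]
    · have hn1 : 1 ≤ l.length := by
        have h0 : l.length ≠ 0 := fun hz => hl (List.eq_nil_of_length_eq_zero hz)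
        omega
      rw [loopA_append l x 0 none 0 0 0 [] (Nat.zero_le _), ih hl]
      simp only [stepL, Prod.mk.injEq]
      have hcnt : (if some x = l.getLast? then runLen l + 1 else 1) = runLen (l ++ [x]) :=
        (runLen_append hl x).symm
      by_cases hcut : some x = l.getLast? ∧ 2 ≤ runLen l
      · -- a new cut at index l.length
        have hn2 : 2 ≤ l.length := le_trans hcut.2 (runLen_le_length l)
        have hC : pvCuts (l ++ [x]) = pvCuts l ++ [l.length] := by
          rw [pvCuts_append l x hl, if_pos hcut]
        have ha' : (pvCuts (l ++ [x])).map (· - 1) =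
            (pvCuts l).map (· - 1) ++ [l.length - 1] := by
          rw [hC]; simp
        have hls : lastStart (l ++ [x]) = l.length - 1 := by
          unfold lastStart
          rw [ha', List.getLastD_concat]
        have hlen1 : (l ++ [x]).length - 1 = l.length := by simp
        have hseg : segPairs (l ++ [x]) = segPairs l ++ [(l.length - 1, l.length)] := by
          unfold segPairs
          rw [ha', hlen1, zip_last ((pvCuts l).map (· - 1) ++ [l.length - 1]) 0 l.length,
            zip_cons_append, List.getLastD_concat]
        obtain ⟨q, hq⟩ := bestF_segPairs_some hl
        have hqb := segPairs_bounds hl (mem_bestF hq)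
        have hB' : bestF (segPairs (l ++ [x])) = bestO (some q) (l.length - 1, l.length) := by
          rw [hseg, bestF_append, hq]
        refine ⟨List.getLast?_concat.symm, hcnt, ?_, by simp, ?_, ?_⟩
        · rw [if_pos ((cond_iff x l).mpr hcut), hls]
        · rw [if_pos ((cond_iff x l).mpr hcut), hB', hq, bestO_some_mk, bLen_some]
          split_ifs with h1
          · rw [bLen_mk]; omega
          · rw [bLen_some]; omega
        · rw [if_pos ((cond_iff x l).mpr hcut), hB', hq, bestO_some_mk, bLen_some]
          split_ifs with h1
          · exact bRes_slice (l ++ [x]) (l.length - 1) (l.length + 1) (by omega)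
          · exact (bRes_append hqb.1 hqb.2 hl).symm
      · -- no new cut: the current segment extends by one
        have hC : pvCuts (l ++ [x]) = pvCuts l := by
          rw [pvCuts_append l x hl, if_neg hcut, List.append_nil]
        have hls : lastStart (l ++ [x]) = lastStart l := by
          unfold lastStart; rw [hC]
        have hlen1 : (l ++ [x]).length - 1 = l.length := by simp
        have hseg : segPairs (l ++ [x]) = closedP l ++ [(lastStart l, l.length)] := by
          unfold segPairs
          rw [hC, hlen1, zip_last]
          rfl
        have hsegl := segPairs_eq l
        have hs : lastStart l ≤ l.length - 1 := lastStart_le hl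
        have hB : bestF (segPairs l) = bestO (bestF (closedP l)) (lastStart l, l.length - 1) := by
          rw [hsegl, bestF_append]
        have hB' : bestF (segPairs (l ++ [x])) = bestO (bestF (closedP l)) (lastStart l, l.length) := by
          rw [hseg, bestF_append]
        refine ⟨List.getLast?_concat.symm, hcnt, ?_, by simp, ?_, ?_⟩
        · rw [if_neg (fun hc => hcut ((cond_iff x l).mp hc)), hls]
        · rw [if_neg (fun hc => hcut ((cond_iff x l).mp hc)), hB, hB']
          rcases bestF (closedP l) with _ | q0
          · rw [bestO_none_mk, bestO_none_mk, bLen_mk, bLen_mk]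
            omega
          · rw [bestO_some_mk, bestO_some_mk]
            split_ifs with h1 h2 <;> simp only [bLen_some, bLen_mk] <;> omega
        · rw [if_neg (fun hc => hcut ((cond_iff x l).mp hc)), hB, hB']
          rcases hC0 : bestF (closedP l) with _ | q0
          · rw [bestO_none_mk, bestO_none_mk, bLen_mk]
            rw [if_pos (by omega)]
            exact bRes_slice (l ++ [x]) (lastStart l) (l.length + 1) (by omega)
          · have hq0m : q0 ∈ segPairs l := by
              rw [hsegl]
              exact List.mem_append_left _ (mem_bestF hC0)
            have hq0b := segPairs_bounds hl hq0m
            rw [bestO_some_mk, bestO_some_mk]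
            by_cases hc1 : l.length - 1 - lastStart l + 1 > q0.2 - q0.1 + 1
            · rw [if_pos hc1, bLen_mk, if_pos (by omega), if_pos (by omega)]
              exact bRes_slice (l ++ [x]) (lastStart l) (l.length + 1) (by omega)
            · rw [if_neg hc1, bLen_some]
              by_cases hc3 : l.length - lastStart l + 1 > q0.2 - q0.1 + 1
              · rw [if_pos (by omega), if_pos hc3]
                exact bRes_slice (l ++ [x]) (lastStart l) (l.length + 1) (by omega)
              · rw [if_neg (by omega), if_neg hc3]
                exact (bRes_append hq0b.1 hq0b.2 hl).symm

-- ===== VERDICT (by name: the statement is the Claim_ definition above) =====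
theorem longestValidString_spec : Claim_equal_longestValidString := by
  unfold Claim_equal_longestValidString Spec_longestValidString
  intro str _
  unfold longestValidString longestValidString_alt
  rcases eq_or_ne str.toList [] with he | hne
  · rw [he]
    rw [loopA, dif_neg (by simp)]
    simp
  · rw [invA _ hne]
    have hn0 : ¬ (str.toList.length = 0) := fun hz => hne (List.eq_nil_of_length_eq_zero hz)
    rw [if_neg hn0]
    rcases hps : segPairs str.toList with _ | ⟨p0, rest⟩
    · exfalso
      have h2 := segPairs_eq str.toList
      rw [hps] at h2
      exact absurd h2.symm (by simp)
    · have hpairs : (0 :: (pvCuts str.toList).map (· - 1)).zip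
          ((pvCuts str.toList).map (· - 1) ++ [str.toList.length - 1]) = p0 :: rest := hps
      simp only [hpairs, List.tail_cons, List.headD_cons]
      have hbf : bestF (p0 :: rest) =
          some (rest.foldl (fun b p => if p.2 - p.1 + 1 > b.2 - b.1 + 1 then p else b) p0) := by
        show (p0 :: rest).foldl bestO none = _
        rw [List.foldl_cons]
        exact foldl_bestO_some rest p0
      rw [hbf]
      rw [bRes_slice str.toList _ _ (by omega)]
      rfl
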